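-- pv_equiv track=rewrite | github.com/dshorthouse/NetiNeti | src/neti_neti_helper.py | right_strip
-- ===== SOURCE A (Python) =====
-- def right_strip(token):
--     """This takes a token and strips non alpha characters off the right. It
--     returns the stripped string and the number of characters it stripped.
--
--     amount of stripped characters allows to calculate locations of found
--     scientific names within the original document
--
--     Arguments:
--     t -- a one word token
--
--     """
--     i = -1
--     while(i >= -len(token)):
--         if(not token[i].isalpha()):
--             i = i - 1
--         else:
--             break
--     if(i == -1):
--         return(token, 0)
--     elif(i == -(len(token) + 1)):
--         return('', 0)
--     else:
--         return(token[:i + 1], i + 1)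
-- ===== SOURCE B (Python) =====
-- def right_strip(token):
--     """Single left-to-right pass: remember the index of the last alpha char,
--     then slice once at the end."""
--     last = -1
--     for k, ch in enumerate(token):
--         if ch.isalpha():
--             last = k
--     n = len(token)
--     if last == -1:
--         return ('', 0)
--     if last == n - 1:
--         return (token, 0)
--     return (token[:last + 1], last + 1 - n)
-- ===== Notes on version B (the rewrite author's own statement) =====
-- stated objective: alternative
-- what changed: B replaces A's right-to-left negative-index while loop with a single left-to-right enumerate pass that records the index of the last alphabetic character and slices once afterwards.
import Mathlib
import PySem

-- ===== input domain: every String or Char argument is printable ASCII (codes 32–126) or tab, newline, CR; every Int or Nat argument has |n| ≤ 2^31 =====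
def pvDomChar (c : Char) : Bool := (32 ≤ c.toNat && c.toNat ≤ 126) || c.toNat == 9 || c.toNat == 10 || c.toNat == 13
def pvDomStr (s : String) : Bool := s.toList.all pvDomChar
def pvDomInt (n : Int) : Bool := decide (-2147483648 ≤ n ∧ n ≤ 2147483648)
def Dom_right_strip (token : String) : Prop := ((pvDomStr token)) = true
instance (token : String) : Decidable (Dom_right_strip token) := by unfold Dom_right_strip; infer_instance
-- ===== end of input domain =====

-- B replaces A's right-to-left negative-index while loop with a single left-to-right
-- enumerate pass recording the last alphabetic index, then one slice (alternative decomposition).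

-- ===== PORT A =====
-- the while loop of A: decrement i while token[i] is not alphabetic; fuel = len+1 bounds the loop
def rsLoopA (cs : List Char) (i : Int) : Nat → Int
  | 0 => i
  | f + 1 =>
    if i ≥ -(cs.length : Int) then
      match PySem.List.pyGet? cs i with
      | some c => if ¬ PySem.Chars.isalpha c then rsLoopA cs (i - 1) f else i
      | none => i          -- unreachable under the guard
    else i

def right_strip (token : String) : String × Int :=
  let n : Int := (token.toList.length : Int)
  let i : Int := rsLoopA token.toList (-1) (token.toList.length + 1)
  if i = -1 then (token, 0)
  else if i = -(n + 1) then ("", 0)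
  else (PySem.Str.slice token none (some (i + 1)), i + 1)

-- ===== PORT B =====
def right_strip_alt (token : String) : String × Int :=
  let last : Int := (PySem.List.enumerate token.toList).foldl
      (fun acc p => if PySem.Chars.isalpha p.2 then p.1 else acc) (-1)
  let n : Int := (token.toList.length : Int)
  if last = -1 then ("", 0)
  else if last = n - 1 then (token, 0)
  else (PySem.Str.slice token none (some (last + 1)), last + 1 - n)

-- ===== PRECONDITION & SPEC =====
def Spec_right_strip (token : String) (out : String × Int) : Prop := out = right_strip_alt token
instance (token : String) (out : String × Int) : Decidable (Spec_right_strip token out) := by unfold Spec_right_strip; infer_instance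

-- ===== CLAIM (what is proved, stated in full; the proofs are below) =====
def Claim_equal_right_strip : Prop := ∀ (token : String), Dom_right_strip token → Spec_right_strip token (right_strip token)

-- ===== LEMMAS AND PROOFS =====

-- A's loop lands at -(k+1) where k counts the trailing non-alphabetic characters
theorem rsLoopA_eq (cs : List Char) : ∀ (fuel m : Nat), cs.length ≤ m + fuel →
    rsLoopA cs (-(m + 1 : Int)) fuel
      = -(((m + ((cs.reverse.drop m).takeWhile (fun c => ¬ PySem.Chars.isalpha c)).length : Nat) : Int) + 1) := by
  intro fuel
  induction fuel with
  | zero =>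
    intro m hm
    have h0 : cs.reverse.drop m = [] := by
      apply List.drop_eq_nil_of_le; simpa using by omega
    simp [rsLoopA, h0]
  | succ f ih =>
    intro m hm
    by_cases hmn : m < cs.length
    · have hguard : (-(m + 1 : Int) ≥ -(cs.length : Int)) := by omega
      have hget : PySem.List.pyGet? cs (-(m + 1 : Int)) = cs[cs.length - (m+1)]? := by
        have := PySem.List.pyGet?_neg_natCast (xs := cs) (k := m + 1) (by omega) (by omega)
        simpa using this
      have hswap : cs.length - (m+1) = cs.length - 1 - m := by omega
      rw [hswap] at hget
      have hlt : cs.length - 1 - m < cs.length := by omega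
      have hidx : cs[cs.length - 1 - m]? = some cs[cs.length - 1 - m] := List.getElem?_eq_getElem hlt
      have hmrev : m < cs.reverse.length := by simpa using hmn
      have hdrop : cs.reverse.drop m = cs.reverse[m] :: cs.reverse.drop (m+1) :=
        List.drop_eq_getElem_cons hmrev
      have hrevget : cs.reverse[m] = cs[cs.length - 1 - m] := by
        rw [List.getElem_reverse]
      by_cases halpha : PySem.Chars.isalpha cs[cs.length - 1 - m] = true
      · have : (cs.reverse.drop m).takeWhile (fun c => ¬ PySem.Chars.isalpha c) = [] := by
          rw [hdrop, hrevget]; simp [List.takeWhile, halpha]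
        simp only [rsLoopA]
        rw [if_pos hguard]
        simp only [hget, hidx]
        rw [if_neg (by simp only [not_not]; exact halpha)]
        rw [this]
        simp
      · have hrec : rsLoopA cs (-(m + 1 : Int) - 1) f
            = -((((m+1) + ((cs.reverse.drop (m+1)).takeWhile (fun c => ¬ PySem.Chars.isalpha c)).length : Nat) : Int) + 1) := by
          have := ih (m+1) (by omega)
          have harg : (-(m + 1 : Int) - 1) = -((m+1 : Nat) + 1 : Int) := by push_cast; ring
          rw [harg]
          simpa using this
        have htk : (cs.reverse.drop m).takeWhile (fun c => ¬ PySem.Chars.isalpha c)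
            = cs[cs.length - 1 - m] :: (cs.reverse.drop (m+1)).takeWhile (fun c => ¬ PySem.Chars.isalpha c) := by
          rw [hdrop, hrevget]; simp [List.takeWhile, halpha]
        simp only [rsLoopA]
        rw [if_pos hguard]
        simp only [hget, hidx]
        rw [if_pos (by simp [halpha]), hrec, htk]
        push_cast
        simp
        ring
    · have hguard : ¬ (-(m + 1 : Int) ≥ -(cs.length : Int)) := by omega
      have h0 : cs.reverse.drop m = [] := by
        apply List.drop_eq_nil_of_le; simpa using by omega
      simp only [rsLoopA]
      rw [if_neg hguard]
      simp [h0]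

theorem enumerate_append_singleton {α : Type} (xs : List α) (x : α) : ∀ (s : Int),
    PySem.List.enumerate (xs ++ [x]) s = PySem.List.enumerate xs s ++ [(s + xs.length, x)] := by
  induction xs with
  | nil => intro s; simp [PySem.List.enumerate_nil, PySem.List.enumerate_cons]
  | cons y ys ih =>
    intro s
    simp only [List.cons_append, PySem.List.enumerate_cons, ih (s+1), List.length_cons]
    push_cast
    ring_nf

theorem foldB_eq (cs : List Char) :
    (PySem.List.enumerate cs).foldl (fun acc p => if PySem.Chars.isalpha p.2 then p.1 else acc) (-1)
      = (cs.length : Int) - ((cs.reverse.takeWhile (fun c => ¬ PySem.Chars.isalpha c)).length : Int) - 1 := by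
  induction cs using List.reverseRecOn with
  | nil => simp [PySem.List.enumerate_nil]
  | append_singleton ys y ih =>
    rw [enumerate_append_singleton, List.foldl_append]
    simp only [List.foldl_cons, List.foldl_nil, List.reverse_append, List.reverse_cons,
      List.reverse_nil, List.nil_append, List.cons_append, List.takeWhile]
    by_cases h : PySem.Chars.isalpha y = true
    · simp [h]
    · simp only [h, ih]
      simp [List.length_append]

-- ===== VERDICT (by name: the statement is the Claim_ definition above) =====
theorem right_strip_spec : Claim_equal_right_strip := by
  intro token _
  unfold Spec_right_strip right_strip right_strip_alt
  have hk : rsLoopA token.toList (-1) (token.toList.length + 1)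
      = -(((token.toList.reverse.takeWhile (fun c => ¬ PySem.Chars.isalpha c)).length : Int) + 1) := by
    have h := rsLoopA_eq token.toList (token.toList.length + 1) 0 (by omega)
    simpa using h
  have hb := foldB_eq token.toList
  rw [hk, hb]
  set n := token.toList.length with hn
  set k := (token.toList.reverse.takeWhile (fun c => ¬ PySem.Chars.isalpha c)).length with hkdef
  have hkn : k ≤ n := by
    rw [hkdef, hn]
    have h := (List.takeWhile_prefix
      (fun c => decide (¬ PySem.Chars.isalpha c = true)) (l := token.toList.reverse)).length_le
    simpa using h
  simp only []
  split_ifs <;> try omega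
  all_goals try rfl
  · -- k = 0 and n = k : empty token, A returns (token, 0) = ("", 0)
    have hn0 : n = 0 := by omega
    have htok : token = "" := String.toList_eq_nil_iff.mp (List.length_eq_zero_iff.mp hn0)
    rw [htok]
  · -- 0 < k < n : both sides slice away the k trailing non-alphabetic characters
    have hkpos : 0 < k := by omega
    have hklt : k < n := by omega
    refine Prod.ext ?_ (by omega)
    simp only [PySem.Str.slice]
    have e1 : (-((k:Int) + 1) + 1 : Int) = -(k:Int) := by ring
    have e2 : ((n:Int) - (k:Int) - 1 + 1 : Int) = ((n - k : Nat) : Int) := by omega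
    rw [e1, e2, PySem.Chars.slice_eq_listSlice, PySem.Chars.slice_eq_listSlice,
      PySem.List.slice_to_neg_natCast _ k hkpos, PySem.List.slice_to _ (by positivity)]
    simp [hn]
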